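-- pv_equiv track=rewrite | github.com/ushka1/manimations | src/utils/rook_polynomials.py | _get_available_rook_configs_helper
-- ===== SOURCE A (Python) =====
-- def _get_available_rook_configs_helper(
--         i: int,
--         j: int,
--         rows: int,
--         cols: int,
--         forbidden_positions: list[tuple[int, int]],
--         reserved_rows: list[int],
--         reserved_cols: list[int],
--         rooks_count: int,
-- ) -> list[list[tuple[int, int]]] | None:
--     # configuration of given size found
--     if rooks_count == 0:
--         return []
--
--     # configuration of given size cannot be found
--     if i >= rows:
--         return None
--
--     next_i = i
--     next_j = (j + 1) % cols
--     if next_j == 0: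
--         next_i += 1
--
--     # skip forbidden squares and reserved rows and columns
--     if i in reserved_rows or j in reserved_cols or (i, j) in forbidden_positions:
--         return _get_available_rook_configs_helper(
--             next_i,
--             next_j,
--             rows,
--             cols,
--             forbidden_positions,
--             reserved_rows,
--             reserved_cols,
--             rooks_count,
--         )
--
--     res = []
--
--     # include current square
--     if rooks_count == 1:
--         res = [[(i, j)]]
--     else:
--         included = _get_available_rook_configs_helper(
--             next_i,
--             next_j,
--             rows,
--             cols,
--             forbidden_positions,
--             reserved_rows + [i],
--             reserved_cols + [j],
--             rooks_count - 1,
--         )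
--
--         if included is not None:
--             for conf in included:
--                 res.append([(i, j)] + conf)
--
--     # exclude current square
--     excluded = _get_available_rook_configs_helper(
--         next_i,
--         next_j,
--         rows,
--         cols,
--         forbidden_positions,
--         reserved_rows,
--         reserved_cols,
--         rooks_count,
--     )
--
--     if excluded is not None:
--         res += excluded
--
--     return res
-- ===== SOURCE B (Python) =====
-- def _get_available_rook_configs_helper(
--         i,
--         j,
--         rows,
--         cols,
--         forbidden_positions,
--         reserved_rows,
--         reserved_cols,
--         rooks_count,
-- ):
--     # Size-0 configuration: A returns [] here.
--     if rooks_count == 0: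
--         return []
--
--     # Stage 1: one flat scan collecting the available cells from (i, j) on,
--     # in scan order.
--     free = []
--     ci, cj = i, j
--     while ci < rows:
--         if (ci not in reserved_rows
--                 and cj not in reserved_cols
--                 and (ci, cj) not in forbidden_positions):
--             free.append((ci, cj))
--         cj = (cj + 1) % cols
--         if cj == 0:
--             ci += 1
--
--     # Stage 2: enumerate configurations over the flat cell list alone.
--     return _combos(free, rooks_count)
--
--
-- def _combos(free, k):
--     # No available cell at all: no configuration can be found.
--     if not free:
--         return None
--     if k == 1:
--         return [[c] for c in free]
--     res = []
--     rest = free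
--     while rest:
--         (r, c), rest = rest[0], rest[1:]
--         sub = _combos([p for p in rest if p[0] != r and p[1] != c], k - 1)
--         if sub is not None:
--             res += [[(r, c)] + conf for conf in sub]
--     return res
-- ===== Notes on version B (the rewrite author's own statement) =====
-- stated objective: alternative
-- what changed: A's single interleaved include/exclude recursion over board cells (carrying reserved-row/col lists and re-scanning the board at every level) is replaced by two stages: one flat scan that collects the available cells into a list, then a purely list-based combinatorial recursion (_combos) that picks each cell as the next rook and recurses on the suffix filtered by row/column, never touching the board or reserved lists again.
import Mathlib
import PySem

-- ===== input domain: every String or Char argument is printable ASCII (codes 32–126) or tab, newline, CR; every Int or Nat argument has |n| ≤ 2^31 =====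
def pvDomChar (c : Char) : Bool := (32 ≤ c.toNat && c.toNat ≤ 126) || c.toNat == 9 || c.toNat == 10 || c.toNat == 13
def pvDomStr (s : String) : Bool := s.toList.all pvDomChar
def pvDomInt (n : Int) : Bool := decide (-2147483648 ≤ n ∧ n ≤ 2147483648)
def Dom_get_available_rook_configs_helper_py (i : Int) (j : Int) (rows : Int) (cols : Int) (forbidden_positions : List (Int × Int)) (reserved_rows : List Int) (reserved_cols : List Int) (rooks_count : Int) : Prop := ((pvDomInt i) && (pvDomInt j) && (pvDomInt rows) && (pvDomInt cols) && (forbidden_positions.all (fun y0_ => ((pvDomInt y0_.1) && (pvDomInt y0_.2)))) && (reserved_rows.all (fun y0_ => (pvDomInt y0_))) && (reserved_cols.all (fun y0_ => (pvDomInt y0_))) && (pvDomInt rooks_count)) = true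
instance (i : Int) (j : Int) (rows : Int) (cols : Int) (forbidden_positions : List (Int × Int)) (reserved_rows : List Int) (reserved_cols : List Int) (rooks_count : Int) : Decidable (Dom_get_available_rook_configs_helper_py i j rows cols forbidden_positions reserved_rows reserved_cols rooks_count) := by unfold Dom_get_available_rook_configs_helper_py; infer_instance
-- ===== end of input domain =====

-- B replaces A's interleaved include/exclude board recursion by two stages: one flat scan
-- collecting the available cells, then a combinatorial recursion over that cell list alone.

-- Termination measure shared by both ports: number of cell-advance steps left from (i, j).
def rookMeasure (i j rows cols : Int) : Nat :=
  (rows - i).toNat * cols.natAbs + ((-1 - j) % (cols.natAbs : Int)).toNat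

-- ===== PORT A =====
-- A's recursion, structurally on a fuel argument; fuel 0 is never reached when the wrapper
-- below starts it with rookMeasure + 1 (pure totality guard, no algorithmic content).
def pyAFuel : Nat → Int → Int → Int → Int → List (Int × Int) → List Int → List Int → Int → Option (List (List (Int × Int)))
  | 0, _, _, _, _, _, _, _, _ => none
  | fuel + 1, i, j, rows, cols, forbidden_positions, reserved_rows, reserved_cols, rooks_count =>
    if rooks_count = 0 then some []
    else if rows ≤ i then none
    else if cols = 0 then none  -- Python raises ZeroDivisionError at '(j+1) % cols' here; totality guard, excluded by Pre_
    else
      let next_j := PySem.Int.mod (j + 1) cols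
      let next_i := if next_j = 0 then i + 1 else i
      if i ∈ reserved_rows ∨ j ∈ reserved_cols ∨ (i, j) ∈ forbidden_positions then
        pyAFuel fuel next_i next_j rows cols forbidden_positions reserved_rows reserved_cols rooks_count
      else
        let res : List (List (Int × Int)) :=
          if rooks_count = 1 then [[(i, j)]]
          else
            match pyAFuel fuel next_i next_j rows cols forbidden_positions (reserved_rows ++ [i]) (reserved_cols ++ [j]) (rooks_count - 1) with
            | none => []
            | some included => included.map (fun conf => (i, j) :: conf)
        let res2 : List (List (Int × Int)) :=
          match pyAFuel fuel next_i next_j rows cols forbidden_positions reserved_rows reserved_cols rooks_count with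
          | none => res
          | some excluded => res ++ excluded
        some res2

def get_available_rook_configs_helper_py (i : Int) (j : Int) (rows : Int) (cols : Int) (forbidden_positions : List (Int × Int)) (reserved_rows : List Int) (reserved_cols : List Int) (rooks_count : Int) : Option (List (List (Int × Int))) :=
  pyAFuel (rookMeasure i j rows cols + 1) i j rows cols forbidden_positions reserved_rows reserved_cols rooks_count

-- ===== PORT B =====
-- Stage 1 of Source B: the flat while-loop collecting the available cells in scan order,
-- structurally on fuel, started with rookMeasure + 1 (pure totality guard).
def scanFree : Nat → Int → Int → Int → Int → List (Int × Int) → List Int → List Int → List (Int × Int)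
  | 0, _, _, _, _, _, _, _ => []
  | fuel + 1, ci, cj, rows, cols, forbidden_positions, reserved_rows, reserved_cols =>
    if rows ≤ ci then []
    else if cols = 0 then []  -- Python raises ZeroDivisionError at '(cj+1) % cols' here; totality guard, excluded by Pre_
    else
      let head : List (Int × Int) :=
        if ¬ ci ∈ reserved_rows ∧ ¬ cj ∈ reserved_cols ∧ ¬ (ci, cj) ∈ forbidden_positions then [(ci, cj)] else []
      let next_j := PySem.Int.mod (cj + 1) cols
      let next_i := if next_j = 0 then ci + 1 else ci
      head ++ scanFree fuel next_i next_j rows cols forbidden_positions reserved_rows reserved_cols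

-- Stage 2 of Source B: _combos over the flat cell list (combosLoop is its inner while-loop).
mutual
def combos : List (Int × Int) → Int → Option (List (List (Int × Int)))
  | [], _ => none
  | x :: rest, k =>
    if k = 1 then some ((x :: rest).map (fun c => [c]))
    else some (combosLoop (x :: rest) k)
  termination_by free _ => (free.length, 1)

def combosLoop : List (Int × Int) → Int → List (List (Int × Int))
  | [], _ => []
  | (r, c) :: rest, k =>
    (match combos (rest.filter (fun p => p.1 != r && p.2 != c)) (k - 1) with
     | none => []
     | some sub => sub.map (fun conf => (r, c) :: conf)) ++ combosLoop rest k
  termination_by free _ => (free.length, 0)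
  decreasing_by
  · exact Prod.Lex.left _ _ (Nat.lt_succ_of_le (List.length_filter_le _ _))
  · exact Prod.Lex.left _ _ (Nat.lt_succ_self _)
end

def get_available_rook_configs_helper_py_alt (i : Int) (j : Int) (rows : Int) (cols : Int) (forbidden_positions : List (Int × Int)) (reserved_rows : List Int) (reserved_cols : List Int) (rooks_count : Int) : Option (List (List (Int × Int))) :=
  if rooks_count = 0 then some []
  else combos (scanFree (rookMeasure i j rows cols + 1) i j rows cols forbidden_positions reserved_rows reserved_cols) rooks_count

-- ===== PRECONDITION & SPEC =====
-- Pre_ excludes exactly the inputs on which Python A raises ZeroDivisionError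
-- (cols == 0 reached by the '%' expression, i.e. cols == 0 with rooks_count ≠ 0 and i < rows).
def Pre_get_available_rook_configs_helper_py (i : Int) (j : Int) (rows : Int) (cols : Int) (forbidden_positions : List (Int × Int)) (reserved_rows : List Int) (reserved_cols : List Int) (rooks_count : Int) : Prop :=
  cols ≠ 0 ∨ rooks_count = 0 ∨ rows ≤ i
instance (i : Int) (j : Int) (rows : Int) (cols : Int) (forbidden_positions : List (Int × Int)) (reserved_rows : List Int) (reserved_cols : List Int) (rooks_count : Int) : Decidable (Pre_get_available_rook_configs_helper_py i j rows cols forbidden_positions reserved_rows reserved_cols rooks_count) := by unfold Pre_get_available_rook_configs_helper_py; infer_instance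

def pvWitness_get_available_rook_configs_helper_py : Int × Int × Int × Int × (List (Int × Int)) × List Int × List Int × Int := (0, 0, 2, 2, [(0, 0)], [], [], 1)

def Spec_get_available_rook_configs_helper_py (i : Int) (j : Int) (rows : Int) (cols : Int) (forbidden_positions : List (Int × Int)) (reserved_rows : List Int) (reserved_cols : List Int) (rooks_count : Int) (out : Option (List (List (Int × Int)))) : Prop := out = get_available_rook_configs_helper_py_alt i j rows cols forbidden_positions reserved_rows reserved_cols rooks_count
instance (i : Int) (j : Int) (rows : Int) (cols : Int) (forbidden_positions : List (Int × Int)) (reserved_rows : List Int) (reserved_cols : List Int) (rooks_count : Int) (out : Option (List (List (Int × Int)))) : Decidable (Spec_get_available_rook_configs_helper_py i j rows cols forbidden_positions reserved_rows reserved_cols rooks_count out) := by unfold Spec_get_available_rook_configs_helper_py; infer_instance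

-- ===== CLAIM =====
def Claim_equal_get_available_rook_configs_helper_py : Prop := ∀ (i : Int) (j : Int) (rows : Int) (cols : Int) (forbidden_positions : List (Int × Int)) (reserved_rows : List Int) (reserved_cols : List Int) (rooks_count : Int), Dom_get_available_rook_configs_helper_py i j rows cols forbidden_positions reserved_rows reserved_cols rooks_count → Pre_get_available_rook_configs_helper_py i j rows cols forbidden_positions reserved_rows reserved_cols rooks_count → Spec_get_available_rook_configs_helper_py i j rows cols forbidden_positions reserved_rows reserved_cols rooks_count (get_available_rook_configs_helper_py i j rows cols forbidden_positions reserved_rows reserved_cols rooks_count)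

-- ===== LEMMAS AND PROOFS =====

lemma rookMeasure_helper {t t' n A B : Nat} (ht : t = t' + 1) (hAB : A < n + B) :
    t' * n + A < t * n + B := by
  subst ht
  calc t' * n + A < t' * n + (n + B) := by omega
    _ = (t' + 1) * n + B := by ring

-- The cell advance next_j = (j+1) % cols, next_i strictly decreases rookMeasure (cols ≠ 0, i < rows).
lemma rookStep_lt (i j rows cols : Int) (hc : ¬ cols = 0) (hr : ¬ rows ≤ i) :
    rookMeasure (if PySem.Int.mod (j + 1) cols = 0 then i + 1 else i)
      (PySem.Int.mod (j + 1) cols) rows cols < rookMeasure i j rows cols := by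
  have hN : (0 : Int) < (cols.natAbs : Int) := by
    have := Int.natAbs_pos.mpr hc; exact_mod_cast this
  set N : Int := (cols.natAbs : Int) with hNdef
  set m : Int := PySem.Int.mod (j + 1) cols with hm
  have hdvdc : cols ∣ ((-1 - m) - (-2 - j)) := by
    have h1 : PySem.Int.floordiv (j + 1) cols * cols + m = j + 1 :=
      PySem.Int.floordiv_mul_add_mod (j + 1) cols
    exact ⟨PySem.Int.floordiv (j + 1) cols, by linarith⟩
  have hdvd : N ∣ ((-1 - m) - (-2 - j)) := (Int.natAbs_dvd).mpr hdvdc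
  have hcong : (-2 - j) % N = (-1 - m) % N :=
    Int.modEq_iff_dvd.mpr hdvd
  have he0 : 0 ≤ (-1 - j) % N := Int.emod_nonneg _ (by omega)
  have he1 : (-1 - j) % N < N := Int.emod_lt_of_pos _ hN
  have hsub : N ∣ ((-1 - j) - (-1 - j) % N) := by
    have := Int.mul_ediv_add_emod (-1 - j) N
    exact ⟨(-1 - j) / N, by linarith⟩
  have hcong2 : ((-1 - j) % N - 1) % N = (-2 - j) % N := by
    apply Int.modEq_iff_dvd.mpr
    have : (-2 - j) - ((-1 - j) % N - 1) = ((-1 - j) - (-1 - j) % N) := by ring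
    rw [this]; exact hsub
  by_cases hm0 : m = 0
  · have hval : (-1 - m) % N = N - 1 := by
      rw [hm0]
      have h1 : (-1 - 0 : Int) % N = (N - 1) % N := by
        apply Int.modEq_iff_dvd.mpr; exact ⟨1, by ring⟩
      rw [h1, Int.emod_eq_of_lt (by omega) (by omega)]
    rw [if_pos hm0, rookMeasure, rookMeasure, ← hNdef, hval]
    apply rookMeasure_helper (t' := (rows - (i + 1)).toNat) (by omega)
    omega
  · have hene : (-1 - j) % N ≠ 0 := by
      intro h0
      apply hm0
      have hdj : N ∣ (-1 - j) := by
        have := hsub; rw [h0] at this; simpa using this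
      have hcj : cols ∣ (j + 1) := by
        have h1 : cols ∣ (-1 - j) := (Int.natAbs_dvd).mp hdj
        have h2 : (j + 1 : Int) = -(-1 - j) := by ring
        rw [h2]; exact dvd_neg.mpr h1
      rw [hm]; exact (PySem.Int.mod_eq_zero_iff_dvd _ _).mpr hcj
    have hval : (-1 - m) % N = (-1 - j) % N - 1 := by
      rw [← hcong, ← hcong2, Int.emod_eq_of_lt (by omega) (by omega)]
    rw [if_neg hm0, rookMeasure, rookMeasure, ← hNdef, hval]
    omega

-- Augmenting a reserved row/column filters the scanned free-cell list.
lemma scanFree_reserved : ∀ (f : Nat) (ci cj rows cols : Int) (fp : List (Int × Int)) (rr rc : List Int) (r0 c0 : Int), scanFree f ci cj rows cols fp (rr ++ [r0]) (rc ++ [c0]) = (scanFree f ci cj rows cols fp rr rc).filter (fun p => p.1 != r0 && p.2 != c0) := by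
  intro f
  induction f with
  | zero => intro ci cj rows cols fp rr rc r0 c0; simp [scanFree]
  | succ f ih =>
    intro ci cj rows cols fp rr rc r0 c0
    rw [scanFree, scanFree]
    by_cases hr : rows ≤ ci
    · simp [hr]
    · by_cases hc : cols = 0
      · simp [hr, hc]
      · simp only [if_neg hr, if_neg hc, List.filter_append]
        rw [ih]
        congr 1
        by_cases hfree : ¬ ci ∈ rr ∧ ¬ cj ∈ rc ∧ ¬ (ci, cj) ∈ fp
        · by_cases hrow : ci = r0 ∨ cj = c0
          · have : ¬ (¬ ci ∈ rr ++ [r0] ∧ ¬ cj ∈ rc ++ [c0] ∧ ¬ (ci, cj) ∈ fp) := by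
              simp only [List.mem_append, List.mem_singleton]; tauto
            rw [if_neg this, if_pos hfree]
            simp only [List.filter_cons, List.filter_nil]
            have : ((ci != r0) && (cj != c0)) = false := by
              rcases hrow with h | h <;> simp [h]
            simp [this]
          · have h1 : ¬ ci ∈ rr ++ [r0] ∧ ¬ cj ∈ rc ++ [c0] ∧ ¬ (ci, cj) ∈ fp := by
              simp only [List.mem_append, List.mem_singleton]; tauto
            rw [if_pos h1, if_pos hfree]
            have : ((ci != r0) && (cj != c0)) = true := by
              simp only [not_or] at hrow; simp [hrow.1, hrow.2]
            simp [this]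
        · have h1 : ¬ (¬ ci ∈ rr ++ [r0] ∧ ¬ cj ∈ rc ++ [c0] ∧ ¬ (ci, cj) ∈ fp) := by
            simp only [List.mem_append, List.mem_singleton]; tauto
          rw [if_neg h1, if_neg hfree]
          simp

-- A's recursion computes exactly combos of the scanned free-cell list (rooks_count ≠ 0),
-- for any two sufficient fuels.
lemma pyAFuel_eq_combos_scan : ∀ (f g : Nat) (i j rows cols : Int) (fp : List (Int × Int)) (rr rc : List Int) (k : Int), rookMeasure i j rows cols < f → rookMeasure i j rows cols < g → k ≠ 0 → pyAFuel f i j rows cols fp rr rc k = combos (scanFree g i j rows cols fp rr rc) k := by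
  intro f
  induction f with
  | zero => intro g i j rows cols fp rr rc k hf; omega
  | succ f ih =>
    intro g i j rows cols fp rr rc k hf hg hk
    obtain ⟨g', rfl⟩ : ∃ g', g = g' + 1 := ⟨g - 1, by omega⟩
    rw [pyAFuel, scanFree]
    by_cases hr : rows ≤ i
    · simp [hk, hr, combos]
    · by_cases hc : cols = 0
      · simp [hk, hr, hc, combos]
      · simp only [if_neg hk, if_neg hr, if_neg hc]
        have hstep := rookStep_lt i j rows cols hc hr
        set nj := PySem.Int.mod (j + 1) cols with hnj
        set ni := (if nj = 0 then i + 1 else i) with hni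
        have hltf : rookMeasure ni nj rows cols < f := by omega
        have hltg : rookMeasure ni nj rows cols < g' := by omega
        set S := scanFree g' ni nj rows cols fp rr rc with hS
        by_cases hb : i ∈ rr ∨ j ∈ rc ∨ (i, j) ∈ fp
        · rw [if_pos hb, if_neg (show ¬ (¬ i ∈ rr ∧ ¬ j ∈ rc ∧ ¬ (i, j) ∈ fp) by tauto)]
          simpa using ih g' ni nj rows cols fp rr rc k hltf hltg hk
        · have hfree : ¬ i ∈ rr ∧ ¬ j ∈ rc ∧ ¬ (i, j) ∈ fp := by tauto
          rw [if_neg hb, if_pos hfree]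
          have hexc : pyAFuel f ni nj rows cols fp rr rc k = combos S k :=
            ih g' ni nj rows cols fp rr rc k hltf hltg hk
          by_cases hk1 : k = 1
          · subst hk1
            rw [hexc]
            cases hScase : S with
            | nil => simp [combos]
            | cons x rest => simp [combos]
          · have hinc : pyAFuel f ni nj rows cols fp (rr ++ [i]) (rc ++ [j]) (k - 1) = combos (S.filter (fun p => p.1 != i && p.2 != j)) (k - 1) := by
              rw [ih g' ni nj rows cols fp (rr ++ [i]) (rc ++ [j]) (k - 1) hltf hltg (by omega), scanFree_reserved]
            rw [if_neg hk1, hexc, hinc]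
            show some _ = combos ((i, j) :: S) k
            rw [combos]
            rw [if_neg hk1, combosLoop]
            cases hScase : S with
            | nil => simp [combos, combosLoop]
            | cons x rest =>
              have hcs : combos (x :: rest) k = some (combosLoop (x :: rest) k) := by
                rw [combos, if_neg hk1]
              rw [hcs]

-- ===== VERDICT =====
theorem get_available_rook_configs_helper_py_spec : Claim_equal_get_available_rook_configs_helper_py := by
  intro i j rows cols fp rr rc k _hdom _hpre
  unfold Spec_get_available_rook_configs_helper_py
  rw [get_available_rook_configs_helper_py, get_available_rook_configs_helper_py_alt]
  by_cases hk : k = 0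
  · subst hk
    rw [pyAFuel]
    simp
  · rw [if_neg hk]
    exact pyAFuel_eq_combos_scan (rookMeasure i j rows cols + 1) (rookMeasure i j rows cols + 1) i j rows cols fp rr rc k (by omega) (by omega) hk
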